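-- pv_equiv track=rewrite | github.com/aws-samples/aws-do-pm | Container-Root/src/python/lib/util/dict_util.py | flatten_dol
-- ===== SOURCE A (Python) =====
-- def flatten_dol(inp_dict):
--     ret_map = dict()
--     flat_list = list()
--     name_list = list()
--     param_names = inp_dict.keys()
--
--     count = 0
--     for name in param_names:
--         param_length = len(inp_dict[name])
--         flat_list.extend(inp_dict[name])
--         name_list.extend(['%s_%d'%(name, idx) for idx in range(param_length)])
--         ret_map[name] = [count+i for i in range(param_length)]
--         count = count + param_length
--     return flat_list, name_list, ret_map
-- ===== SOURCE B (Python) =====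
-- def flatten_dol(inp_dict):
--     items = list(inp_dict.items())
--     lengths = [len(v) for _, v in items]
--     offsets = [0]
--     for L in lengths:
--         offsets.append(offsets[-1] + L)
--     flat_list = [x for _, v in items for x in v]
--     name_list = ['%s_%d' % (n, i) for n, v in items for i in range(len(v))]
--     ret_map = {n: list(range(offsets[k], offsets[k + 1])) for k, (n, _) in enumerate(items)}
--     return flat_list, name_list, ret_map
-- ===== Notes on version B (the rewrite author's own statement) =====
-- stated objective: alternative
-- what changed: Replaces A's single loop that threads a running count through flat_list/name_list/ret_map by a precomputed prefix-sum offset table followed by independent passes: a flatten pass, a name pass, and ret_map read directly off the offset table.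
import Mathlib
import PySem

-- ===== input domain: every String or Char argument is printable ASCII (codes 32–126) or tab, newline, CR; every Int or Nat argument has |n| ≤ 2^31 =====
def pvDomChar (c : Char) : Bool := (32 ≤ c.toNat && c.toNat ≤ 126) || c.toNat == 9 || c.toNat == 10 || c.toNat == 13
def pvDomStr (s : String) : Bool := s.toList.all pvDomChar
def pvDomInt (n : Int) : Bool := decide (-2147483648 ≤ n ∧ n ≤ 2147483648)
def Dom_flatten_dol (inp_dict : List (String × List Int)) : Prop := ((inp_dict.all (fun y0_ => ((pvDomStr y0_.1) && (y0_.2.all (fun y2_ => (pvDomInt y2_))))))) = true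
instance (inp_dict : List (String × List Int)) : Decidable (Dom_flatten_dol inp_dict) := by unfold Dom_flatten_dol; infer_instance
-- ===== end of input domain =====

-- B replaces A's single loop threading a running count by a prefix-sum offset table plus
-- independent passes (flatten, name, offset-range); equal cost, different decomposition.

-- ===== PORT A =====
-- The input assoc list denotes the Python dict argument: PySem.Dict.ofList realises Python's
-- dict construction (first-key position, last value), so the port is total.
def flatten_dol (inp_dict : List (String × List Int)) : List Int × List String × (List (String × List Int)) :=
  let d := PySem.Dict.ofList inp_dict
  let param_names := d.keys
  -- loop state: (flat_list, name_list, ret_map, count)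
  let st := param_names.foldl
    (fun (st : List Int × List String × PySem.Dict String (List Int) × Int) name =>
      let v := d.getD name []            -- inp_dict[name]; name ∈ keys, so the lookup never raises
      let param_length : Int := (v.length : Int)
      (st.1 ++ v,
       st.2.1 ++ (PySem.List.pyRange 0 param_length 1).map (fun idx => name ++ "_" ++ PySem.Int.toStr idx),
       st.2.2.1.insert name ((PySem.List.pyRange 0 param_length 1).map (fun i => st.2.2.2 + i)),
       st.2.2.2 + param_length))
    ([], [], PySem.Dict.empty, 0)
  (st.1, st.2.1, st.2.2.1.items)

-- ===== PORT B =====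
def flatten_dol_alt (inp_dict : List (String × List Int)) : List Int × List String × (List (String × List Int)) :=
  let items := (PySem.Dict.ofList inp_dict).items
  let lengths : List Int := items.map (fun p => (p.2.length : Int))
  -- offsets[-1] is pyGet? at -1; the list starts at [0] so it is never none (.getD 0 is unreachable)
  let offsets := lengths.foldl (fun acc L => acc ++ [(PySem.List.pyGet? acc (-1)).getD 0 + L]) [0]
  let flat_list := items.flatMap (fun p => p.2)
  let name_list := items.flatMap (fun p => (PySem.List.pyRange 0 (p.2.length : Int) 1).map (fun i => p.1 ++ "_" ++ PySem.Int.toStr i))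
  -- offsets[k], offsets[k+1] are always in range (len offsets = len items + 1); .getD 0 unreachable
  let ret_map := (PySem.List.enumerate items 0).foldl
    (fun d kp => d.insert kp.2.1
      (PySem.List.pyRange ((PySem.List.pyGet? offsets kp.1).getD 0)
                          ((PySem.List.pyGet? offsets (kp.1 + 1)).getD 0) 1))
    PySem.Dict.empty
  (flat_list, name_list, ret_map.items)

-- ===== PRECONDITION & SPEC =====
def Spec_flatten_dol (inp_dict : List (String × List Int)) (out : List Int × List String × (List (String × List Int))) : Prop := out = flatten_dol_alt inp_dict
instance (inp_dict : List (String × List Int)) (out : List Int × List String × (List (String × List Int))) : Decidable (Spec_flatten_dol inp_dict out) := by unfold Spec_flatten_dol; infer_instance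

-- ===== CLAIM (what is proved, stated in full; the proofs are below) =====
def Claim_equal_flatten_dol : Prop := ∀ (inp_dict : List (String × List Int)), Dom_flatten_dol inp_dict → Spec_flatten_dol inp_dict (flatten_dol inp_dict)

-- ===== LEMMAS AND PROOFS =====

-- the per-name blocks of ret_map, with running offset c (shape as A builds it)
def pvMapOff (c : Int) : List (String × List Int) → List (String × List Int)
  | [] => []
  | p :: r => (p.1, (PySem.List.pyRange 0 (p.2.length : Int) 1).map (fun i => c + i)) :: pvMapOff (c + (p.2.length : Int)) r

-- prefix-sum list: pvOsum c ls = [c, c+ls[0], c+ls[0]+ls[1], …]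
def pvOsum (c : Int) : List Int → List Int
  | [] => [c]
  | L :: ls => c :: pvOsum (c + L) ls

def pvAStep (st : List Int × List String × PySem.Dict String (List Int) × Int) (p : String × List Int) :
    List Int × List String × PySem.Dict String (List Int) × Int :=
  (st.1 ++ p.2,
   st.2.1 ++ (PySem.List.pyRange 0 (p.2.length : Int) 1).map (fun idx => p.1 ++ "_" ++ PySem.Int.toStr idx),
   st.2.2.1.insert p.1 ((PySem.List.pyRange 0 (p.2.length : Int) 1).map (fun i => st.2.2.2 + i)),
   st.2.2.2 + (p.2.length : Int))

lemma pvAFold (L : List (String × List Int)) :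
    ∀ (f : List Int) (nm : List String) (d : PySem.Dict String (List Int)) (c : Int),
      (∀ p ∈ L, d.contains p.1 = false) → (L.map Prod.fst).Nodup →
      L.foldl pvAStep (f, nm, d, c) =
        (f ++ L.flatMap (fun p => p.2),
         nm ++ L.flatMap (fun p => (PySem.List.pyRange 0 (p.2.length : Int) 1).map (fun i => p.1 ++ "_" ++ PySem.Int.toStr i)),
         PySem.Dict.mk (d.items ++ pvMapOff c L),
         c + (L.map (fun p => (p.2.length : Int))).sum) := by
  induction L with
  | nil => intro f nm d c _ _; simp [pvMapOff]
  | cons p r ih =>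
    intro f nm d c hfresh hnd
    have hdp : d.contains p.1 = false := hfresh p (by simp)
    have hfresh' : ∀ q ∈ r, (d.insert p.1 ((PySem.List.pyRange 0 (p.2.length : Int) 1).map (fun i => c + i))).contains q.1 = false := by
      intro q hq
      rw [PySem.Dict.contains_insert]
      have hne : q.1 ≠ p.1 := by
        simp only [List.map_cons, List.nodup_cons] at hnd
        intro h; exact hnd.1 (h ▸ List.mem_map_of_mem hq)
      simp [hne, hfresh q (List.mem_cons_of_mem _ hq)]
    have hnd' : (r.map Prod.fst).Nodup := by simp only [List.map_cons, List.nodup_cons] at hnd; exact hnd.2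
    have hstep : (p :: r).foldl pvAStep (f, nm, d, c) = r.foldl pvAStep (pvAStep (f, nm, d, c) p) := rfl
    rw [hstep]
    rw [show pvAStep (f, nm, d, c) p =
      (f ++ p.2,
       nm ++ (PySem.List.pyRange 0 (p.2.length : Int) 1).map (fun idx => p.1 ++ "_" ++ PySem.Int.toStr idx),
       d.insert p.1 ((PySem.List.pyRange 0 (p.2.length : Int) 1).map (fun i => c + i)),
       c + (p.2.length : Int)) from rfl]
    rw [ih _ _ _ _ hfresh' hnd']
    rw [PySem.Dict.items_insert_of_not_contains _ _ hdp]
    simp [pvMapOff, add_assoc]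

lemma pvOffsets (ls : List Int) :
    ∀ (acc : List Int) (c : Int),
      ls.foldl (fun acc L => acc ++ [(PySem.List.pyGet? acc (-1)).getD 0 + L]) (acc ++ [c]) = acc ++ pvOsum c ls := by
  induction ls with
  | nil => intro acc c; rfl
  | cons L ls ih =>
    intro acc c
    have hg : PySem.List.pyGet? (acc ++ [c]) (-1) = some c := by simp [pysem]
    simp only [List.foldl_cons, hg, Option.getD_some]
    rw [show acc ++ [c] ++ [c + L] = (acc ++ [c]) ++ [c + L] from rfl, ih (acc ++ [c]) (c + L)]
    simp [pvOsum]

lemma pvOsumGet (ls : List Int) :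
    ∀ (c : Int) (j : Nat), j ≤ ls.length → PySem.List.pyGet? (pvOsum c ls) (j : Int) = some (c + (ls.take j).sum) := by
  induction ls with
  | nil => intro c j hj; have h0 : j = 0 := by simpa using hj
           subst h0; simp [pvOsum, pysem]
  | cons L ls ih =>
    intro c j hj
    cases j with
    | zero => simp [pvOsum, pysem]
    | succ j =>
      have h := ih (c + L) j (by simpa using hj)
      rw [show ((j + 1 : Nat) : Int) = (j : Int) + 1 by push_cast; ring]
      simp [pvOsum, pysem] at h ⊢
      rw [← add_assoc]; exact h

lemma pvRangeShift (c : Int) (n : Int) :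
    PySem.List.pyRange c (c + n) 1 = (PySem.List.pyRange 0 n 1).map (fun i => c + i) := by
  rw [PySem.List.pyRange_one, PySem.List.pyRange_one]
  simp [List.map_map, Function.comp]

lemma pvRetItems (L : List (String × List Int)) :
    ∀ (O : List Int) (s : Nat) (c : Int),
      (∀ j : Nat, j ≤ L.length → PySem.List.pyGet? O ((s + j : Nat) : Int) = some (c + ((L.take j).map (fun p => (p.2.length : Int))).sum)) →
      (PySem.List.enumerate L (s : Int)).map
        (fun kp => (kp.2.1, PySem.List.pyRange ((PySem.List.pyGet? O kp.1).getD 0) ((PySem.List.pyGet? O (kp.1 + 1)).getD 0) 1)) = pvMapOff c L := by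
  induction L with
  | nil => intro O s c _; simp [pvMapOff, PySem.List.enumerate_nil]
  | cons p r ih =>
    intro O s c hO
    have h0 := hO 0 (by simp)
    have h1 := hO 1 (by simp)
    simp only [List.take_zero, List.map_nil, List.sum_nil, add_zero] at h0
    simp only [List.take_succ_cons, List.take_zero, List.map_cons, List.map_nil, List.sum_cons, List.sum_nil, add_zero] at h1
    rw [PySem.List.enumerate_cons, List.map_cons]
    have hcast : ((s : Int) + 1) = ((s + 1 : Nat) : Int) := by push_cast; ring
    rw [pvMapOff]
    congr 1
    · simp only [hcast, h0, h1, Option.getD_some]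
      rw [pvRangeShift c (p.2.length : Int)]
    · rw [hcast]
      apply ih O (s + 1) (c + (p.2.length : Int))
      intro j hj
      have := hO (j + 1) (by simpa using hj)
      rw [show ((s + (j + 1) : Nat) : Int) = ((s + 1 + j : Nat) : Int) by push_cast; ring] at this
      rw [this]
      simp [add_assoc]

-- ===== VERDICT (by name: the statement is the Claim_ definition above) =====
theorem flatten_dol_spec : Claim_equal_flatten_dol := by
  intro inp _
  show flatten_dol inp = flatten_dol_alt inp
  unfold flatten_dol flatten_dol_alt
  dsimp only
  set d := PySem.Dict.ofList inp with hd
  have hnd : d.keys.Nodup := PySem.Dict.nodup_keys_ofList inp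
  have hndf : (d.items.map Prod.fst).Nodup := by simpa [PySem.Dict.keys] using hnd
  -- A's loop over keys with lookups IS the fold of pvAStep over the items
  have hitems : d.items = d.keys.map (fun k => (k, d.getD k [])) := PySem.Dict.items_eq_map_keys d hnd []
  have hAkeys :
      d.keys.foldl (fun (st : List Int × List String × PySem.Dict String (List Int) × Int) name =>
        (st.1 ++ d.getD name [],
         st.2.1 ++ (PySem.List.pyRange 0 ((d.getD name []).length : Int) 1).map (fun idx => name ++ "_" ++ PySem.Int.toStr idx),
         st.2.2.1.insert name ((PySem.List.pyRange 0 ((d.getD name []).length : Int) 1).map (fun i => st.2.2.2 + i)),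
         st.2.2.2 + ((d.getD name []).length : Int))) ([], [], PySem.Dict.empty, 0)
      = d.items.foldl pvAStep ([], [], PySem.Dict.empty, 0) := by
    rw [hitems, List.foldl_map]
    rfl
  rw [hAkeys, pvAFold d.items [] [] PySem.Dict.empty 0 (fun p _ => PySem.Dict.contains_empty p.1) hndf]
  -- B: the offsets list is the prefix-sum list
  have hoff : (d.items.map (fun p => (p.2.length : Int))).foldl
      (fun acc L => acc ++ [(PySem.List.pyGet? acc (-1)).getD 0 + L]) [0]
      = pvOsum 0 (d.items.map (fun p => (p.2.length : Int))) := by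
    have := pvOffsets (d.items.map (fun p => (p.2.length : Int))) [] 0
    simpa using this
  rw [hoff]
  -- B: the dict-comprehension fold appends its (fresh, distinct) keyed entries
  have hsnd : (PySem.List.enumerate d.items 0).map (fun a => a.2.1) = d.items.map Prod.fst := by
    have h2 : (PySem.List.enumerate d.items 0).map (fun a => a.2) = d.items := PySem.List.map_snd_enumerate d.items 0
    calc (PySem.List.enumerate d.items 0).map (fun a => a.2.1)
        = ((PySem.List.enumerate d.items 0).map (fun a => a.2)).map Prod.fst := by rw [List.map_map]; rfl
      _ = d.items.map Prod.fst := by rw [h2]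
  have hret := PySem.Dict.items_foldl_insert_fresh (PySem.List.enumerate d.items 0)
      (fun kp => kp.2.1)
      (fun kp => PySem.List.pyRange ((PySem.List.pyGet? (pvOsum 0 (d.items.map (fun p => (p.2.length : Int)))) kp.1).getD 0)
                   ((PySem.List.pyGet? (pvOsum 0 (d.items.map (fun p => (p.2.length : Int)))) (kp.1 + 1)).getD 0) 1)
      PySem.Dict.empty
      (fun a _ => PySem.Dict.contains_empty a.2.1)
      (by rw [hsnd]; exact hndf)
  rw [hret]
  -- and those entries are exactly the pvMapOff blocks
  have hretmap := pvRetItems d.items (pvOsum 0 (d.items.map (fun p => (p.2.length : Int)))) 0 0 (by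
    intro j hj
    have hg := pvOsumGet (d.items.map (fun p => (p.2.length : Int))) 0 j (by simpa using hj)
    simpa [List.map_take] using hg)
  simp only [Nat.cast_zero] at hretmap
  rw [hretmap]
  simp
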